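-- pv_equiv track=rewrite | github.com/infretis/infretis | infretis/tools/rec_error.py | rec_blocks
-- ===== SOURCE A (Python) =====
-- def rec_blocks(r):
--     b = []
--     for i in range(len(r)):
--         if i == 0:
--             b.append(r[i])
--         else:
--             b.append((i + 1) * r[i] - i * r[i - 1])
--     return b
-- ===== SOURCE B (Python) =====
-- def rec_blocks(r):
--     # Fold over the values, maintaining the running sum `total` of outputs
--     # emitted so far.  Since the outputs telescope (sum of b[0..i-1] equals
--     # i*r[i-1]), each new output is simply k*x - total; no indexing, no branch.
--     out = []
--     total = 0
--     k = 1
--     for x in r: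
--         v = k * x - total
--         out.append(v)
--         total += v
--         k += 1
--     return out
-- ===== Notes on version B (the rewrite author's own statement) =====
-- stated objective: alternative
-- what changed: A loops over indices reading both r[i] and r[i-1] with an i==0 branch; B is a single fold over the values that never looks back into r: it maintains the running sum of outputs emitted so far (which telescopes to i*r[i-1]) and emits k*x - total, branch-free.
import Mathlib
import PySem

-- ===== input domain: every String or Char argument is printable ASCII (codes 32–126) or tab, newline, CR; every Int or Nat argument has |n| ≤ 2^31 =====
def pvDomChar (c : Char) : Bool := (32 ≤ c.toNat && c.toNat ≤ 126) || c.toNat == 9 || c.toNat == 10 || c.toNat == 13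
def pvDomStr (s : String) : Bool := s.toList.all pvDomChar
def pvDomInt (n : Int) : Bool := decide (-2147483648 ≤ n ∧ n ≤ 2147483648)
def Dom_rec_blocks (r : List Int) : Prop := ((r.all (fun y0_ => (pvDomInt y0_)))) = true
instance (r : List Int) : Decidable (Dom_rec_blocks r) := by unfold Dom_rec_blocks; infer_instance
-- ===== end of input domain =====

-- B replaces A's index loop (reading r[i] and r[i-1], with an i==0 branch) by a
-- branch-free fold over the values that maintains the running sum of emitted outputs.

-- ===== PORT A =====
-- indices i and i-1 are always in range, so pyGetD with default 0 is exact here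
def rec_blocks (r : List Int) : List Int :=
  (PySem.List.pyRange 0 (r.length : Int) 1).foldl
    (fun b i =>
      if i == 0 then b ++ [PySem.List.pyGetD r i 0]
      else b ++ [(i + 1) * PySem.List.pyGetD r i 0 - i * PySem.List.pyGetD r (i - 1) 0]) []

-- ===== PORT B =====
-- state (out, total, k): out ++ [v], total += v, k += 1 with v = k*x - total
def rec_blocks_alt (r : List Int) : List Int :=
  (r.foldl
    (fun (st : List Int × Int × Int) x =>
      let v := st.2.2 * x - st.2.1
      (st.1 ++ [v], st.2.1 + v, st.2.2 + 1))
    ([], 0, 1)).1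

-- ===== PRECONDITION & SPEC =====
def Spec_rec_blocks (r : List Int) (out : List Int) : Prop := out = rec_blocks_alt r
instance (r : List Int) (out : List Int) : Decidable (Spec_rec_blocks r out) := by unfold Spec_rec_blocks; infer_instance

-- ===== CLAIM (what is proved, stated in full; the proofs are below) =====
def Claim_equal_rec_blocks : Prop := ∀ (r : List Int), Dom_rec_blocks r → Spec_rec_blocks r (rec_blocks r)

-- ===== LEMMAS AND PROOFS =====

-- reference form: the output, computed with running 1-based offset n and previous value p
def pvSpecList (xs : List Int) (n : Nat) (p : Int) : List Int :=
  match xs with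
  | [] => []
  | x :: rest => (((n : Int) + 1) * x - (n : Int) * p) :: pvSpecList rest (n + 1) x

theorem pvSpecList_length (xs : List Int) : ∀ (n : Nat) (p : Int),
    (pvSpecList xs n p).length = xs.length := by
  induction xs with
  | nil => intro n p; rfl
  | cons x rest ih => intro n p; simp [pvSpecList, ih]

theorem pvSpecList_getElem (xs : List Int) : ∀ (n : Nat) (p : Int) (i : Nat) (h : i < xs.length),
    (pvSpecList xs n p)[i]'(by rw [pvSpecList_length]; exact h)
      = ((n : Int) + (i : Int) + 1) * xs[i]
        - ((n : Int) + (i : Int)) * ((p :: xs)[i]'(by simp; omega)) := by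
  induction xs with
  | nil => intro n p i h; simp at h
  | cons x rest ih =>
    intro n p i h
    cases i with
    | zero => simp [pvSpecList]
    | succ j =>
      have hj : j < rest.length := by simpa using h
      have := ih (n + 1) x j hj
      simp only [pvSpecList, List.getElem_cons_succ]
      rw [this]
      push_cast
      ring_nf

theorem alt_loop (xs : List Int) : ∀ (n : Nat) (p : Int) (acc : List Int),
    (xs.foldl
      (fun (st : List Int × Int × Int) x =>
        let v := st.2.2 * x - st.2.1
        (st.1 ++ [v], st.2.1 + v, st.2.2 + 1))
      (acc, (n : Int) * p, (n : Int) + 1)).1 = acc ++ pvSpecList xs n p := by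
  induction xs with
  | nil => intro n p acc; simp [pvSpecList]
  | cons x rest ih =>
    intro n p acc
    rw [List.foldl_cons]
    show (List.foldl
        (fun (st : List Int × Int × Int) x =>
          let v := st.2.2 * x - st.2.1
          (st.1 ++ [v], st.2.1 + v, st.2.2 + 1))
        (acc ++ [((n : Int) + 1) * x - (n : Int) * p],
          (n : Int) * p + (((n : Int) + 1) * x - (n : Int) * p), (n : Int) + 1 + 1) rest).1
      = acc ++ pvSpecList (x :: rest) n p
    rw [show ((n : Int) * p + (((n : Int) + 1) * x - (n : Int) * p)) = ((n + 1 : Nat) : Int) * x by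
        push_cast; ring,
      show ((n : Int) + 1 + 1) = ((n + 1 : Nat) : Int) + 1 by push_cast; ring,
      ih (n + 1) x]
    simp [pvSpecList]

theorem rec_blocks_eq_map (r : List Int) :
    rec_blocks r = (PySem.List.pyRange 0 (r.length : Int) 1).map
      (fun i => if i == 0 then PySem.List.pyGetD r i 0
        else (i + 1) * PySem.List.pyGetD r i 0 - i * PySem.List.pyGetD r (i - 1) 0) := by
  unfold rec_blocks
  have h : (fun (b : List Int) (i : Int) =>
      if i == 0 then b ++ [PySem.List.pyGetD r i 0]
      else b ++ [(i + 1) * PySem.List.pyGetD r i 0 - i * PySem.List.pyGetD r (i - 1) 0])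
      = (fun b i => b ++ [if i == 0 then PySem.List.pyGetD r i 0
        else (i + 1) * PySem.List.pyGetD r i 0 - i * PySem.List.pyGetD r (i - 1) 0]) := by
    funext b i; split <;> rfl
  rw [h, PySem.List.foldl_append_singleton_eq_map]
  simp

-- ===== VERDICT (by name: the statement is the Claim_ definition above) =====
theorem rec_blocks_spec : Claim_equal_rec_blocks := by
  intro r _
  show rec_blocks r = rec_blocks_alt r
  have halt : rec_blocks_alt r = pvSpecList r 0 0 := by
    unfold rec_blocks_alt
    have := alt_loop r 0 0 []
    simpa using this
  rw [rec_blocks_eq_map, halt]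
  apply List.ext_getElem
  · simp [pvSpecList_length, PySem.List.length_pyRange_one]
  · intro k h1 h2
    have hk : k < r.length := by
      simpa [PySem.List.length_pyRange_one] using h1
    rw [pvSpecList_getElem r 0 0 k hk]
    simp only [List.getElem_map, PySem.List.getElem_pyRange_one]
    cases k with
    | zero =>
      have h0 : PySem.List.pyGetD r 0 0 = r[0] := by
        have h := PySem.List.pyGetD_natCast (xs := r) (n := 0) (d := (0 : Int))
        simpa [List.getD, List.getElem?_eq_getElem hk] using h
      simp [h0]
    | succ j =>
      have hj' : j < r.length := by omega
      have e2 : ((j : Int) + 1) - 1 = (j : Int) := by ring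
      rw [show ((0:Int) + ((j:Nat)+1 : Nat)) = ((j : Int) + 1) by push_cast; ring]
      rw [show (((j : Int) + 1) == 0) = false by simp; omega]
      simp only [Bool.false_eq_true, if_false, e2, PySem.List.pyGetD_natCast]
      rw [show ((j : Int) + 1) = (((j + 1 : Nat)) : Int) by push_cast; ring,
        PySem.List.pyGetD_natCast]
      simp only [List.getD, List.getElem?_eq_getElem hk, List.getElem?_eq_getElem hj',
        Option.getD_some, List.getElem_cons_succ]
      push_cast
      ring
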